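-- pv_equiv track=rewrite | github.com/vishwaksen21/signaction | signaction/lexicon.py | apply_phrase_mapping
-- ===== SOURCE A (Python) =====
-- def apply_phrase_mapping(tokens: list[str], phrases: dict[str, str]) -> list[str]:
--     """Greedy longest-match phrase mapping over token list.
--
--     Example: ["THANK", "YOU"] -> ["THANK_YOU"]
--     """
--
--     if not tokens:
--         return []
--
--     # Precompute phrase tokenization
--     phrase_to_parts: list[tuple[list[str], str]] = []
--     for phrase, out in phrases.items():
--         parts = phrase.split()
--         phrase_to_parts.append((parts, out.replace(" ", "_")))
--
--     phrase_to_parts.sort(key=lambda x: len(x[0]), reverse=True)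
--
--     i = 0
--     out_tokens: list[str] = []
--     while i < len(tokens):
--         matched = False
--         for parts, out in phrase_to_parts:
--             n = len(parts)
--             if n == 0 or i + n > len(tokens):
--                 continue
--             if tokens[i : i + n] == parts:
--                 out_tokens.append(out)
--                 i += n
--                 matched = True
--                 break
--         if not matched:
--             out_tokens.append(tokens[i])
--             i += 1
--
--     return out_tokens
-- ===== SOURCE B (Python) =====
-- def apply_phrase_mapping(tokens: list[str], phrases: dict[str, str]) -> list[str]:
--     """Greedy longest-match phrase mapping, with phrases indexed by their first token.
--
--     Instead of scanning the whole phrase list at every position, bucket the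
--     (length-sorted) phrases under their first token; at each position only the
--     bucket of the current token is scanned.
--     """
--
--     if not tokens:
--         return []
--
--     prep = [(phrase.split(), out.replace(" ", "_")) for phrase, out in phrases.items()]
--     prep.sort(key=lambda x: len(x[0]), reverse=True)
--
--     buckets: dict[str, list[tuple[list[str], str]]] = {}
--     for parts, out in prep:
--         if parts:
--             buckets.setdefault(parts[0], []).append((parts, out))
--
--     n_tok = len(tokens)
--     out_tokens: list[str] = []
--     empty: list[tuple[list[str], str]] = []
--     i = 0
--     while i < n_tok:
--         matched = False
--         for parts, out in buckets.get(tokens[i], empty):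
--             n = len(parts)
--             if i + n <= n_tok and tokens[i : i + n] == parts:
--                 out_tokens.append(out)
--                 i += n
--                 matched = True
--                 break
--         if not matched:
--             out_tokens.append(tokens[i])
--             i += 1
--     return out_tokens
-- ===== Notes on version B (the rewrite author's own statement) =====
-- stated objective: faster
-- what changed: Instead of scanning the entire length-sorted phrase list at every token position, B builds a one-time index of the phrases bucketed under their first token, so each position only scans the (typically tiny) bucket of its current token.
import Mathlib
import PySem

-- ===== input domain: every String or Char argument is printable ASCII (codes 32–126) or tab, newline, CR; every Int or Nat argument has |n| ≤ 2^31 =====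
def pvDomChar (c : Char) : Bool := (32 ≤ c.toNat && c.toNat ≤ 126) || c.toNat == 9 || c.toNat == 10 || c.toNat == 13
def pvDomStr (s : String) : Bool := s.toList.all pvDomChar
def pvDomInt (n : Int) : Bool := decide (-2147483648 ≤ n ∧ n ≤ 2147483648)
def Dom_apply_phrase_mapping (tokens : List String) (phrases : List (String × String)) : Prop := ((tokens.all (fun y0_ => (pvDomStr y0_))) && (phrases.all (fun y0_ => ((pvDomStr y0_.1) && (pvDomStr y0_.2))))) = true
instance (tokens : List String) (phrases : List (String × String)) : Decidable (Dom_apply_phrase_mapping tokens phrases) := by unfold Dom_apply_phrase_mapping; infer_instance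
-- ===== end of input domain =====

-- B replaces A's full scan of the length-sorted phrase list at every position by a
-- one-time index of the phrases under their first token, so each position only scans
-- its own (typically tiny) bucket; same return value (objective: faster in practice).

-- ===== PORT A =====
-- inner `for parts, out in phrase_to_parts:` loop: first entry matching at position i,
-- returned together with its length n (the code then does `i += n`)
def pmFindA (tokens : List String) (i : Nat) :
    List (List String × String) → Option (String × Nat)
  | [] => none
  | x :: rest =>
    let n := x.1.length
    if n = 0 ∨ tokens.length < i + n then pmFindA tokens i rest
    else if PySem.List.slice tokens (some (i : Int)) (some ((i : Int) + (n : Int))) = x.1 then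
      some (x.2, n)
    else pmFindA tokens i rest

-- a successful match has 1 ≤ n (the n = 0 guard skips): needed for the while loop's termination
theorem pmFindA_pos (tokens : List String) (i : Nat) (pl : List (List String × String))
    {o : String} {n : Nat} (hm : pmFindA tokens i pl = some (o, n)) : 0 < n := by
  induction pl with
  | nil => simp [pmFindA] at hm
  | cons x rest ih =>
    rw [pmFindA] at hm
    split at hm
    · exact ih hm
    · split at hm
      · simp at hm
        omega
      · exact ih hm

-- `while i < len(tokens):` of A
def pmLoopA (tokens : List String) (pl : List (List String × String)) (i : Nat) : List String :=
  if h : i < tokens.length then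
    match hm : pmFindA tokens i pl with
    | some (o, n) => o :: pmLoopA tokens pl (i + n)
    | none => tokens[i] :: pmLoopA tokens pl (i + 1)
  else []
termination_by tokens.length - i
decreasing_by
  · have := pmFindA_pos tokens i pl hm
    omega
  · omega

def apply_phrase_mapping (tokens : List String) (phrases : List (String × String)) : List String :=
  if tokens = [] then []
  else
    pmLoopA tokens
      (PySem.List.sorted
        ((PySem.Dict.ofList phrases).items.map
          (fun q => (PySem.Str.split₀ q.1, PySem.Str.replace q.2 " " "_")))
        (fun x => x.1.length) true) 0

-- ===== PORT B =====
-- `buckets.setdefault(parts[0], []).append((parts, out))` loop of Source B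
def pmBuckets (prep : List (List String × String)) :
    PySem.Dict String (List (List String × String)) :=
  prep.foldl (fun d x => if x.1 = [] then d else d.modify (x.1.headD "") [] (· ++ [x]))
    PySem.Dict.empty

-- inner `for parts, out in buckets.get(tokens[i], empty):` loop of Source B
def pmFindB (tokens : List String) (i : Nat) :
    List (List String × String) → Option (String × Nat)
  | [] => none
  | x :: rest =>
    let n := x.1.length
    if i + n ≤ tokens.length ∧
        PySem.List.slice tokens (some (i : Int)) (some ((i : Int) + (n : Int))) = x.1 then
      some (x.2, n)
    else pmFindB tokens i rest

-- a successful match comes from an entry of the scanned bucket (for termination)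
theorem pmFindB_mem (tokens : List String) (i : Nat) (l : List (List String × String))
    {o : String} {n : Nat} (hm : pmFindB tokens i l = some (o, n)) :
    ∃ x ∈ l, x.1.length = n := by
  induction l with
  | nil => simp [pmFindB] at hm
  | cons x rest ih =>
    rw [pmFindB] at hm
    split at hm
    · simp at hm
      exact ⟨x, by simp, by omega⟩
    · obtain ⟨y, hy, hyn⟩ := ih hm
      exact ⟨y, by simp [hy], hyn⟩

-- every bucketed phrase is nonempty (the `if parts:` guard): needed for termination
theorem pmBuckets_nonempty (prep : List (List String × String)) :
    ∀ s x, x ∈ (pmBuckets prep).getD s [] → x.1 ≠ [] := by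
  unfold pmBuckets
  induction prep using List.reverseRecOn with
  | nil => intro s x hx; simp [PySem.Dict.getD_empty] at hx
  | append_singleton rest y ih =>
    intro s x hx
    rw [List.foldl_append, List.foldl_cons, List.foldl_nil] at hx
    by_cases hy : y.1 = []
    · rw [if_pos hy] at hx
      exact ih s x hx
    · rw [if_neg hy, PySem.Dict.getD_modify] at hx
      split at hx
      · rcases List.mem_append.mp hx with h | h
        · exact ih _ x h
        · simp at h
          rw [h]
          exact hy
      · exact ih s x hx

-- `while i < n_tok:` of Source B; hb is the bucket invariant the termination proof cites
def pmLoopB (tokens : List String)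
    (buckets : PySem.Dict String (List (List String × String)))
    (hb : ∀ s x, x ∈ buckets.getD s [] → x.1 ≠ []) (i : Nat) : List String :=
  if h : i < tokens.length then
    match hm : pmFindB tokens i (buckets.getD tokens[i] []) with
    | some (o, n) => o :: pmLoopB tokens buckets hb (i + n)
    | none => tokens[i] :: pmLoopB tokens buckets hb (i + 1)
  else []
termination_by tokens.length - i
decreasing_by
  · obtain ⟨x, hx, hn⟩ := pmFindB_mem tokens i _ hm
    have hne := hb _ _ hx
    have : 0 < n := by
      cases hxe : x.1 with
      | nil => exact absurd hxe hne
      | cons a b => rw [hxe] at hn; simp at hn; omega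
    omega
  · omega

def apply_phrase_mapping_alt (tokens : List String) (phrases : List (String × String)) :
    List String :=
  if tokens = [] then []
  else
    let prep := PySem.List.sorted
      ((PySem.Dict.ofList phrases).items.map
        (fun q => (PySem.Str.split₀ q.1, PySem.Str.replace q.2 " " "_")))
      (fun x => x.1.length) true
    pmLoopB tokens (pmBuckets prep) (pmBuckets_nonempty prep) 0

-- ===== PRECONDITION & SPEC =====
def Spec_apply_phrase_mapping (tokens : List String) (phrases : List (String × String)) (out : List String) : Prop := out = apply_phrase_mapping_alt tokens phrases
instance (tokens : List String) (phrases : List (String × String)) (out : List String) : Decidable (Spec_apply_phrase_mapping tokens phrases out) := by unfold Spec_apply_phrase_mapping; infer_instance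

-- ===== CLAIM (what is proved, stated in full; the proofs are below) =====
def Claim_equal_apply_phrase_mapping : Prop := ∀ (tokens : List String) (phrases : List (String × String)), Dom_apply_phrase_mapping tokens phrases → Spec_apply_phrase_mapping tokens phrases (apply_phrase_mapping tokens phrases)

-- ===== LEMMAS AND PROOFS =====

-- the bucket under key k is exactly the nonempty-phrase entries whose first token is k,
-- in list order
theorem pmBuckets_getD (prep : List (List String × String)) (k : String) :
    (pmBuckets prep).getD k [] =
      prep.filter (fun x => (x.1.headD "" == k) && !(decide (x.1 = []))) := by
  unfold pmBuckets
  have hstep : (fun (d : PySem.Dict String (List (List String × String))) (x : List String × String) =>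
      if x.1 = [] then d else d.modify (x.1.headD "") [] (· ++ [x]))
      = fun d x => if ¬ (x.1 = []) then d.modify (x.1.headD "") [] (· ++ [x]) else d := by
    funext d x
    by_cases hx : x.1 = [] <;> simp [hx]
  rw [hstep, PySem.List.foldl_ite_eq_foldl_filter]
  have hmap : (List.filter (fun x => decide ¬(x.1 = [])) prep).foldl
      (fun d (x : List String × String) => d.modify (x.1.headD "") [] (· ++ [x])) PySem.Dict.empty
      = ((List.filter (fun x => decide ¬(x.1 = [])) prep).map (fun x => (x.1.headD "", x))).foldl
        (fun d q => d.modify q.1 [] (· ++ [q.2])) PySem.Dict.empty := by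
    rw [List.foldl_map]
  rw [hmap, PySem.Dict.getD_foldl_modify_append, PySem.Dict.getD_empty]
  rw [List.filter_map, List.map_map]
  simp [Function.comp_def, List.filter_filter]

-- the head of a nonempty slice tokens[i:i+n] is tokens[i]
theorem slice_head (tokens : List String) (i n : Nat) (h : i < tokens.length) (hn : 0 < n) :
    ((tokens.drop i).take n).head? = some tokens[i] := by
  cases n with
  | zero => omega
  | succ m =>
    have hd : (tokens.drop i).head? = some tokens[i] := by
      rw [List.head?_drop]
      exact List.getElem?_eq_getElem h
    cases hdrop : tokens.drop i with
    | nil => rw [hdrop] at hd; simp at hd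
    | cons a t =>
      rw [hdrop] at hd
      simp at hd
      simp [hd]

-- at each in-range position, A's scan of the whole list equals B's scan of the
-- first-token bucket (= the corresponding filter of the same list)
theorem find_eq (tokens : List String) (i : Nat) (h : i < tokens.length)
    (l : List (List String × String)) :
    pmFindA tokens i l =
      pmFindB tokens i
        (l.filter (fun x => (x.1.headD "" == tokens[i]) && !(decide (x.1 = [])))) := by
  induction l with
  | nil => rfl
  | cons x rest ih =>
    rw [pmFindA, List.filter_cons]
    by_cases hp : ((x.1.headD "" == tokens[i]) && !(decide (x.1 = []))) = true
    · rw [if_pos hp, pmFindB]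
      rw [Bool.and_eq_true] at hp
      obtain ⟨hhead', hne'⟩ := hp
      have hne : ¬ x.1 = [] := by simpa using hne'
      have hn0 : ¬ x.1.length = 0 := by simpa [List.length_eq_zero_iff] using hne
      by_cases hr : i + x.1.length ≤ tokens.length
      · by_cases hsl : PySem.List.slice tokens (some (i : Int)) (some ((i : Int) + (x.1.length : Int))) = x.1
        · simp [hn0, hr, hsl, Nat.not_lt.mpr hr]
        · simp [hn0, hsl, Nat.not_lt.mpr hr, hr, ih]
      · have hlt : tokens.length < i + x.1.length := by omega
        simp [hn0, hlt, hr, ih]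
    · rw [if_neg hp]
      by_cases hg : x.1.length = 0 ∨ tokens.length < i + x.1.length
      · simp only [if_pos hg]
        exact ih
      · rw [not_or] at hg
        have hsl : ¬ (PySem.List.slice tokens (some (i : Int)) (some ((i : Int) + (x.1.length : Int))) = x.1) := by
          intro hEq
          have h1 : ((tokens.drop i).take x.1.length).head? = some tokens[i] :=
            slice_head tokens i x.1.length h (by omega)
          rw [PySem.List.slice_natCast_add] at hEq
          rw [hEq] at h1
          cases hx1 : x.1 with
          | nil => rw [hx1] at hg; simp at hg
          | cons a t =>
            rw [hx1] at h1
            simp at h1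
            apply hp
            simp [hx1, h1]
        rw [if_neg (show ¬ (x.1.length = 0 ∨ tokens.length < i + x.1.length) by omega)]
        rw [if_neg hsl]
        exact ih

theorem loop_eq (tokens : List String) (prep : List (List String × String)) :
    ∀ k i, tokens.length ≤ i + k →
      pmLoopA tokens prep i = pmLoopB tokens (pmBuckets prep) (pmBuckets_nonempty prep) i := by
  intro k
  induction k with
  | zero =>
    intro i hik
    rw [pmLoopA, pmLoopB, dif_neg (by omega), dif_neg (by omega)]
  | succ m ih =>
    intro i hik
    by_cases hi : i < tokens.length
    · rw [pmLoopA, pmLoopB, dif_pos hi, dif_pos hi]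
      rw [pmBuckets_getD prep tokens[i], ← find_eq tokens i hi prep]
      cases hA : pmFindA tokens i prep with
      | none => exact congrArg (tokens[i] :: ·) (ih (i + 1) (by omega))
      | some p =>
        obtain ⟨o, n⟩ := p
        have hn := pmFindA_pos tokens i prep hA
        exact congrArg (o :: ·) (ih (i + n) (by omega))
    · rw [pmLoopA, pmLoopB, dif_neg hi, dif_neg hi]

-- ===== VERDICT (by name: the statement is the Claim_ definition above) =====
theorem apply_phrase_mapping_spec : Claim_equal_apply_phrase_mapping := by
  intro tokens phrases _
  unfold Spec_apply_phrase_mapping apply_phrase_mapping apply_phrase_mapping_alt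
  by_cases ht : tokens = []
  · simp [ht]
  · rw [if_neg ht, if_neg ht]
    exact loop_eq tokens _ tokens.length 0 (by omega)
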